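-- pv_equiv track=rewrite | github.com/treverehrlich/wordlelabs | functions.py | letter_position_counts
-- ===== SOURCE A (Python) =====
-- def letter_position_counts(word_list):
--     from collections import defaultdict
--     counts = defaultdict(lambda: [0, 0, 0, 0, 0])
--     for word in word_list:
--         if len(word) != 5:
--             continue
--         for i, letter in enumerate(word.lower()):
--             counts[letter][i] += 1
--     return dict(counts)
-- ===== SOURCE B (Python) =====
-- def letter_position_counts(word_list):
--     words = [w.lower() for w in word_list if len(w) == 5]
--     order = dict.fromkeys(l for w in words for l in w)
--     return {l: [[w[i] for w in words].count(l) for i in range(5)] for l in order}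
-- ===== Notes on version B (the rewrite author's own statement) =====
-- stated objective: alternative
-- what changed: Replaces the row-major defaultdict that increments one mutable 5-slot row per letter occurrence with a column-major recount: filter+lowercase the 5-letter words once, take the first-occurrence letter order, and build each letter's row by counting that letter in each of the five character columns.
import Mathlib
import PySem

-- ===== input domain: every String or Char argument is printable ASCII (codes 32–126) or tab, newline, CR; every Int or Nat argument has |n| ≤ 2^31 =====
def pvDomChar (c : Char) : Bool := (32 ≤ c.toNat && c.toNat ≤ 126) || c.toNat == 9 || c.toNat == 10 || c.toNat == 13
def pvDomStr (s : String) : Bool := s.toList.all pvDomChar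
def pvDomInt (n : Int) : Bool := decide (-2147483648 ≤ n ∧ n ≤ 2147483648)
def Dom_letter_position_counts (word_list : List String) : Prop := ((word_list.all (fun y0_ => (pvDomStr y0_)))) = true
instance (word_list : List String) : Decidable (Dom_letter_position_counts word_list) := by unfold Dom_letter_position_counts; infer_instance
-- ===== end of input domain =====

-- B replaces A's row-major defaultdict accumulation with a column-major recount over the filtered
-- lowercased 5-letter words (same result; objective: alternative decomposition, not speed).


-- ===== PORT A =====
-- counts[letter][i] += 1 : the index i is always in range (value lists have 5 slots, i < 5),
-- pySetD/pyGetD are exact there; defaultdict access-then-increment is Dict.modify with default zeros.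
def letter_position_counts (word_list : List String) : List (String × List Int) :=
  (word_list.foldl (fun counts word =>
      if PySem.Str.len word ≠ 5 then counts
      else (PySem.List.enumerate (PySem.Str.lower word).toList 0).foldl
        (fun counts p =>
          counts.modify (String.ofList [p.2]) [0, 0, 0, 0, 0]
            (fun v => PySem.List.pySetD v p.1 (PySem.List.pyGetD v p.1 0 + 1)))
        counts)
    PySem.Dict.empty).items

-- ===== PORT B =====
def letter_position_counts_alt (word_list : List String) : List (String × List Int) :=
  let words := (word_list.filter (fun w => PySem.Str.len w == 5)).map PySem.Str.lower
  let order := PySem.List.dedup (words.flatMap (fun w => w.toList))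
  order.map (fun l => (String.ofList [l],
    (PySem.List.pyRange 0 5 1).map (fun i =>
      (((words.map (fun w => PySem.List.pyGetD w.toList i ' ')).count l : Nat) : Int))))

-- ===== PRECONDITION & SPEC =====
def Spec_letter_position_counts (word_list : List String) (out : List (String × List Int)) : Prop := out = letter_position_counts_alt word_list
instance (word_list : List String) (out : List (String × List Int)) : Decidable (Spec_letter_position_counts word_list out) := by unfold Spec_letter_position_counts; infer_instance

-- ===== CLAIM (what is proved, stated in full; the proofs are below) =====
def Claim_equal_letter_position_counts : Prop := ∀ (word_list : List String), Dom_letter_position_counts word_list → Spec_letter_position_counts word_list (letter_position_counts word_list)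

-- ===== LEMMAS AND PROOFS =====

def pvK (c : Char) : String := String.ofList [c]
theorem pvK_inj {a b : Char} (h : pvK a = pvK b) : a = b := by
  have := congrArg String.toList h
  simp [pvK] at this; exact this
def pvCnt (css : List (List Char)) (l : Char) (i : Int) : Int :=
  (((css.map (fun cs => PySem.List.pyGetD cs i ' ')).count l : Nat) : Int)
def pvVals (css : List (List Char)) (l : Char) : List Int :=
  [pvCnt css l 0, pvCnt css l 1, pvCnt css l 2, pvCnt css l 3, pvCnt css l 4]
def pvTbl (css : List (List Char)) : List (String × List Int) :=
  (PySem.Set.ofList css.flatten).map (fun l => (pvK l, pvVals css l))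
def pvInc (i : Int) (v : List Int) : List Int :=
  PySem.List.pySetD v i (PySem.List.pyGetD v i 0 + 1)
def pvStep (counts : PySem.Dict String (List Int)) (cs : List Char) : PySem.Dict String (List Int) :=
  (PySem.List.enumerate cs 0).foldl
    (fun counts p => counts.modify (pvK p.2) [0, 0, 0, 0, 0] (fun v => pvInc p.1 v)) counts
theorem pv_add_map (s : List Char) (x : Char) :
    PySem.Set.add (s.map pvK) (pvK x) = (PySem.Set.add s x).map pvK := by
  by_cases hx : x ∈ s
  · have hm : pvK x ∈ s.map pvK := List.mem_map_of_mem hx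
    simp [PySem.Set.add, PySem.Set.contains, hx, hm]
  · have : ¬ pvK x ∈ s.map pvK := by
      simp [List.mem_map]; intro a ha hk; exact hx (pvK_inj hk ▸ ha)
    simp [PySem.Set.add, PySem.Set.contains, hx, this]
theorem pv_update_map (ys s : List Char) :
    PySem.Set.update (s.map pvK) (ys.map pvK) = (PySem.Set.update s ys).map pvK := by
  induction ys generalizing s with
  | nil => simp [PySem.Set.update]
  | cons y ys ih => simp only [List.map_cons, PySem.Set.update, List.foldl_cons] at *
                    rw [pv_add_map]; exact ih _
theorem pv_getD_foldMod (ps : List (Int × Char)) (D : PySem.Dict String (List Int)) (l : Char) :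
    ((ps.foldl (fun d p => d.modify (pvK p.2) [0,0,0,0,0] (fun v => pvInc p.1 v)) D).getD (pvK l) [0,0,0,0,0])
    = (ps.filter (fun p => p.2 == l)).foldl (fun v p => pvInc p.1 v) (D.getD (pvK l) [0,0,0,0,0]) := by
  induction ps generalizing D with
  | nil => rfl
  | cons q ps ih =>
    by_cases hq : q.2 = l
    · simp only [List.foldl_cons, List.filter_cons, hq, beq_self_eq_true, if_pos]
      rw [ih, PySem.Dict.getD_modify, if_pos rfl]
    · have hne : pvK l ≠ pvK q.2 := fun h => hq (pvK_inj h).symm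
      simp only [List.foldl_cons, List.filter_cons, beq_iff_eq, hq, ite_false]
      rw [ih, PySem.Dict.getD_modify, if_neg hne]
theorem pv_keys_of_tbl (D : PySem.Dict String (List Int)) (css : List (List Char))
    (hI : D.items = pvTbl css) : D.keys = (PySem.Set.ofList css.flatten).map pvK := by
  show D.items.map Prod.fst = _
  rw [hI]; simp [pvTbl, List.map_map, Function.comp]

theorem pv_nodup_keys (D : PySem.Dict String (List Int)) (css : List (List Char))
    (hI : D.items = pvTbl css) : D.keys.Nodup := by
  rw [pv_keys_of_tbl D css hI]
  exact (PySem.Set.nodup_ofList _).map (fun a b h => pvK_inj h)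

theorem pv_cnt_zero (css : List (List Char)) (l : Char) (i : Int)
    (h5 : ∀ cs ∈ css, cs.length = 5) (hl : l ∉ css.flatten) (h0 : 0 ≤ i) (h1 : i < 5) :
    pvCnt css l i = 0 := by
  unfold pvCnt
  norm_num [List.count_eq_zero, List.mem_map]
  intro cs hcs hget
  apply hl
  rw [List.mem_flatten]
  refine ⟨cs, hcs, ?_⟩
  rw [PySem.List.pyGetD_eq_getElem cs ' ' h0 (by rw [h5 cs hcs]; exact_mod_cast h1)] at hget
  rw [← hget]; exact List.getElem_mem _

theorem pv_getD_of_tbl (D : PySem.Dict String (List Int)) (css : List (List Char))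
    (h5 : ∀ cs ∈ css, cs.length = 5) (hI : D.items = pvTbl css) (l : Char) :
    D.getD (pvK l) [0,0,0,0,0] = pvVals css l := by
  by_cases hl : l ∈ css.flatten
  · have hmem : (pvK l, pvVals css l) ∈ D.items := by
      rw [hI]; exact List.mem_map_of_mem ((PySem.Set.mem_ofList _ _).2 hl)
    exact PySem.Dict.getD_of_mem_items D hmem (pv_nodup_keys D css hI) _
  · have hc : D.contains (pvK l) = false := by
      rw [PySem.Dict.contains_eq_decide_mem_keys, decide_eq_false_iff_not,
          pv_keys_of_tbl D css hI]
      simp only [List.mem_map, not_exists, not_and]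
      intro a ha hk
      exact hl ((PySem.Set.mem_ofList _ _).1 ((pvK_inj hk) ▸ ha))
    rw [PySem.Dict.getD_of_not_contains D _ hc]
    unfold pvVals
    rw [pv_cnt_zero css l 0 h5 hl (by norm_num) (by norm_num),
        pv_cnt_zero css l 1 h5 hl (by norm_num) (by norm_num),
        pv_cnt_zero css l 2 h5 hl (by norm_num) (by norm_num),
        pv_cnt_zero css l 3 h5 hl (by norm_num) (by norm_num),
        pv_cnt_zero css l 4 h5 hl (by norm_num) (by norm_num)]
theorem pv_exists5 (c : List Char) (hc : c.length = 5) :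
    ∃ a b d e f, c = [a, b, d, e, f] := by
  match c, hc with
  | [a, b, d, e, f], _ => exact ⟨a, b, d, e, f, rfl⟩

theorem pv_cnt_append (css : List (List Char)) (c : List Char) (l : Char) (i : Int) :
    pvCnt (css ++ [c]) l i
      = pvCnt css l i + (if PySem.List.pyGetD c i ' ' = l then 1 else 0) := by
  unfold pvCnt
  rw [List.map_append, List.count_append]
  by_cases h : PySem.List.pyGetD c i ' ' = l <;> simp [h]

theorem pv_step_getD (D : PySem.Dict String (List Int)) (css : List (List Char)) (c : List Char)
    (h5 : ∀ cs ∈ css, cs.length = 5) (hc : c.length = 5) (hI : D.items = pvTbl css) (l : Char) :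
    (pvStep D c).getD (pvK l) [0,0,0,0,0] = pvVals (css ++ [c]) l := by
  obtain ⟨c0, c1, c2, c3, c4, rfl⟩ := pv_exists5 c hc
  unfold pvStep
  rw [show PySem.List.enumerate [c0,c1,c2,c3,c4] 0
        = [((0:Int),c0),(1,c1),(2,c2),(3,c3),(4,c4)] from by
      simp [PySem.List.enumerate_cons]]
  rw [pv_getD_foldMod, pv_getD_of_tbl D css h5 hI l]
  have e0 := pv_cnt_append css [c0,c1,c2,c3,c4] l 0
  have e1 := pv_cnt_append css [c0,c1,c2,c3,c4] l 1
  have e2 := pv_cnt_append css [c0,c1,c2,c3,c4] l 2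
  have e3 := pv_cnt_append css [c0,c1,c2,c3,c4] l 3
  have e4 := pv_cnt_append css [c0,c1,c2,c3,c4] l 4
  simp only [show PySem.List.pyGetD [c0,c1,c2,c3,c4] 0 ' ' = c0 from rfl,
    show PySem.List.pyGetD [c0,c1,c2,c3,c4] 1 ' ' = c1 from rfl,
    show PySem.List.pyGetD [c0,c1,c2,c3,c4] 2 ' ' = c2 from rfl,
    show PySem.List.pyGetD [c0,c1,c2,c3,c4] 3 ' ' = c3 from rfl,
    show PySem.List.pyGetD [c0,c1,c2,c3,c4] 4 ' ' = c4 from rfl] at e0 e1 e2 e3 e4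
  show _ = [pvCnt (css ++ [[c0,c1,c2,c3,c4]]) l 0, pvCnt (css ++ [[c0,c1,c2,c3,c4]]) l 1,
    pvCnt (css ++ [[c0,c1,c2,c3,c4]]) l 2, pvCnt (css ++ [[c0,c1,c2,c3,c4]]) l 3,
    pvCnt (css ++ [[c0,c1,c2,c3,c4]]) l 4]
  rw [e0, e1, e2, e3, e4]
  show (List.filter (fun p => p.2 == l) [((0:Int),c0),(1,c1),(2,c2),(3,c3),(4,c4)]).foldl
      (fun v p => pvInc p.1 v)
      [pvCnt css l 0, pvCnt css l 1, pvCnt css l 2, pvCnt css l 3, pvCnt css l 4] = _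
  by_cases h0 : c0 = l <;> by_cases h1 : c1 = l <;> by_cases h2 : c2 = l <;>
    by_cases h3 : c3 = l <;> by_cases h4 : c4 = l <;>
    simp [h0, h1, h2, h3, h4, pvInc, PySem.List.pySetD, PySem.List.pySet?,
      PySem.List.pyGetD, PySem.List.pyGet?, PySem.List.pyIdx?]

set_option maxHeartbeats 1000000 in
theorem pv_step_items (D : PySem.Dict String (List Int)) (css : List (List Char)) (c : List Char)
    (h5 : ∀ cs ∈ css, cs.length = 5) (hc : c.length = 5) (hI : D.items = pvTbl css) :
    (pvStep D c).items = pvTbl (css ++ [c]) := by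
  have hnd := pv_nodup_keys D css hI
  have hndR : (pvStep D c).keys.Nodup := by
    unfold pvStep
    exact PySem.Dict.nodup_keys_foldl_modify_key (l := PySem.List.enumerate c 0)
      (key := fun (p : Int × Char) => pvK p.2) (d0 := ([0,0,0,0,0] : List Int))
      (f := fun _ p v => pvInc p.1 v) D hnd
  have henum : (PySem.List.enumerate c 0).map (fun p => pvK p.2) = c.map pvK := by
    have := PySem.List.map_snd_enumerate c 0
    calc (PySem.List.enumerate c 0).map (fun p => pvK p.2)
        = ((PySem.List.enumerate c 0).map (fun p => p.2)).map pvK := by rw [List.map_map]; rfl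
      _ = c.map pvK := by rw [this]
  have hkeys : (pvStep D c).keys = (PySem.Set.ofList (css ++ [c]).flatten).map pvK := by
    unfold pvStep
    rw [PySem.Dict.keys_foldl_modify_key (l := PySem.List.enumerate c 0)
      (key := fun (p : Int × Char) => pvK p.2) (d0 := ([0,0,0,0,0] : List Int))
      (f := fun _ p v => pvInc p.1 v) (d := D),
      pv_keys_of_tbl D css hI, henum, pv_update_map]
    congr 1
    rw [List.flatten_append, PySem.Set.ofList_eq_foldl, PySem.Set.ofList_eq_foldl,
      List.foldl_append]
    simp [PySem.Set.update]
  rw [PySem.Dict.items_eq_map_keys _ hndR [0,0,0,0,0], hkeys, List.map_map]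
  unfold pvTbl
  apply List.map_congr_left
  intro l _
  simp only [Function.comp_apply]
  rw [pv_step_getD D css c h5 hc hI l]

theorem pv_fold_items (css : List (List Char)) (h5 : ∀ cs ∈ css, cs.length = 5) :
    (css.foldl pvStep PySem.Dict.empty).items = pvTbl css := by
  induction css using List.reverseRecOn with
  | nil => rfl
  | append_singleton css c ih =>
    have h5' : ∀ cs ∈ css, cs.length = 5 := fun cs h => h5 cs (List.mem_append_left _ h)
    rw [List.foldl_append]
    exact pv_step_items _ css c h5' (h5 c (by simp)) (ih h5')


theorem pv_A_eq_tbl (word_list : List String) :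
    letter_position_counts word_list
      = pvTbl (((word_list.filter (fun w => PySem.Str.len w == 5)).map PySem.Str.lower).map String.toList) := by
  unfold letter_position_counts
  have hstep : ∀ (d : PySem.Dict String (List Int)) (word : String),
      (if PySem.Str.len word ≠ 5 then d
       else (PySem.List.enumerate (PySem.Str.lower word).toList 0).foldl
        (fun counts p =>
          counts.modify (String.ofList [p.2]) [0, 0, 0, 0, 0]
            (fun v => PySem.List.pySetD v p.1 (PySem.List.pyGetD v p.1 0 + 1)))
        d)
      = (if PySem.Str.len word = 5 then pvStep d (PySem.Str.lower word).toList else d) := by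
    intro d word
    by_cases h : PySem.Str.len word = 5 <;> simp [h, pvStep, pvK, pvInc]
  have h1 : word_list.foldl (fun counts word =>
      if PySem.Str.len word ≠ 5 then counts
      else (PySem.List.enumerate (PySem.Str.lower word).toList 0).foldl
        (fun counts p =>
          counts.modify (String.ofList [p.2]) [0, 0, 0, 0, 0]
            (fun v => PySem.List.pySetD v p.1 (PySem.List.pyGetD v p.1 0 + 1)))
        counts) PySem.Dict.empty
      = word_list.foldl (fun d word =>
          if PySem.Str.len word = 5 then pvStep d (PySem.Str.lower word).toList else d)
        PySem.Dict.empty :=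
    PySem.List.foldl_congr_mem _ _ _ _ (fun d w _ => hstep d w)
  rw [h1]
  rw [PySem.List.foldl_ite_eq_foldl_filter (p := fun w => PySem.Str.len w = 5)
      (f := fun d w => pvStep d (PySem.Str.lower w).toList)]
  rw [List.filter_congr (l := word_list)
      (q := fun w => PySem.Str.len w == 5) (fun w _ => by rw [Bool.eq_iff_iff]; simp)]
  rw [show (fun (d : PySem.Dict String (List Int)) w => pvStep d (PySem.Str.lower w).toList)
        = fun d w => pvStep d ((fun x => (PySem.Str.lower x).toList) w) from rfl,
    ← List.foldl_map]
  rw [pv_fold_items]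
  · rw [List.map_map]; rfl
  · intro cs hcs
    simp only [List.mem_map, List.mem_filter] at hcs
    obtain ⟨w, ⟨_, hw⟩, rfl⟩ := hcs
    have : PySem.Str.len w = 5 := by simpa using hw
    rw [PySem.Str.len_eq] at this
    have hlen : w.toList.length = 5 := by exact_mod_cast this
    simp [PySem.Str.toList_lower, PySem.Chars.lower, hlen]

theorem pv_alt_eq_tbl (word_list : List String) :
    letter_position_counts_alt word_list
      = pvTbl (((word_list.filter (fun w => PySem.Str.len w == 5)).map PySem.Str.lower).map String.toList) := by
  unfold letter_position_counts_alt pvTbl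
  simp only [PySem.List.dedup, List.flatMap_def, List.map_map,
    show PySem.List.pyRange 0 5 1 = [(0:Int),1,2,3,4] from rfl]
  apply List.map_congr_left
  intro l _
  simp [pvK, pvVals, pvCnt, List.map_map, Function.comp_def]

-- ===== VERDICT (by name: the statement is the Claim_ definition above) =====
theorem letter_position_counts_spec : Claim_equal_letter_position_counts := by
  intro word_list _
  unfold Spec_letter_position_counts
  rw [pv_A_eq_tbl, pv_alt_eq_tbl]
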